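-- pv_equiv track=rewrite | github.com/1and-or0/PS | 프로그래머스/Python/PG_2_2.py | solution
-- ===== SOURCE A (Python) =====
-- from itertools import permutations
--
-- def solution(babbling):
--     a_word = ["aya", "ye", "woo", "ma"]
--     words = a_word[:]
--     for i in range(2, len(a_word)+1):
--         for x in list(permutations(a_word, i)):
--             word = ""
--             for j in range(len(x)):
--                 word += x[j]
--             words.append(word)
--
--     answer = 0
--     for bb in babbling:
--         if bb in words:
--             answer += 1
--     return answer
-- ===== SOURCE B (Python) =====
-- def solution(babbling):
--     syllables = ["aya", "ye", "woo", "ma"]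
--     count = 0
--     for bb in babbling:
--         rest = bb
--         used = set()
--         progress = True
--         while rest and progress:
--             progress = False
--             for s in syllables:
--                 if s not in used and rest.startswith(s):
--                     used.add(s)
--                     rest = rest[len(s):]
--                     progress = True
--                     break
--         if bb and not rest:
--             count += 1
--     return count
-- ===== Notes on version B (the rewrite author's own statement) =====
-- stated objective: alternative
-- what changed: Instead of pre-building the 64-entry table of all permutation concatenations and testing list membership, B greedily parses each babbling string front-to-back, stripping one unused syllable per step (syllable first letters are distinct, so the parse is deterministic) and counts the string iff it is non-empty and fully consumed.
import Mathlib
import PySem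

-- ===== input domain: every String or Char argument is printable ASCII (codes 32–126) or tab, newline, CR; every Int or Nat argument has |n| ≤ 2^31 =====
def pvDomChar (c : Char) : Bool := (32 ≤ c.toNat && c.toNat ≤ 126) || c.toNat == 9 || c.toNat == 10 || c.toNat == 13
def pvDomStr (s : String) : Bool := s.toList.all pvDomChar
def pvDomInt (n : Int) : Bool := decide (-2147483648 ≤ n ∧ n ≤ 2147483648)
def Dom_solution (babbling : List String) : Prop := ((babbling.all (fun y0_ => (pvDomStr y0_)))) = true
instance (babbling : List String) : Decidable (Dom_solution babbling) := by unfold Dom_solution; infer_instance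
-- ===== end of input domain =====

-- B replaces A's pre-built table of all 64 permutation concatenations by a greedy per-string
-- parse with a used-syllable set (objective: alternative decomposition; no table is built).

-- ===== PORT A =====
-- itertools.permutations(pool, r), in Python's index-lexicographic order:
-- pySelections lists each element with the remaining pool (order preserved)
def pySelections {α : Type} : List α → List (α × List α)
  | [] => []
  | x :: xs => (x, xs) :: (pySelections xs).map (fun p => (p.1, x :: p.2))

def pyPermutations {α : Type} : Nat → List α → List (List α)
  | 0, _ => [[]]
  | n+1, xs => (pySelections xs).flatMap (fun p => (pyPermutations n p.2).map (fun t => p.1 :: t))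

-- the 'words' list A builds: a_word[:] then, for i in range(2, 5), every permutation joined
def pyWords : List String :=
  let a_word : List String := ["aya", "ye", "woo", "ma"]
  (PySem.List.pyRange 2 ((a_word.length : Int) + 1) 1).foldl
    (fun ws i =>
      (pyPermutations i.toNat a_word).foldl
        (fun ws x => ws ++ [x.foldl (fun w s => w ++ s) ""]) ws)
    a_word

def solution (babbling : List String) : Int :=
  babbling.foldl (fun answer bb => if bb ∈ pyWords then answer + 1 else answer) 0

-- ===== PORT B =====
-- first syllable of the candidate list that is unused and a prefix of rest (the inner for/break)
def stripFirst : List String → List Char → List String → Option (String × List Char)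
  | [], _, _ => none
  | s :: ss, rest, used =>
    if used.contains s = false ∧ s.toList.isPrefixOf rest then
      some (s, rest.drop s.toList.length)
    else stripFirst ss rest used

-- the while loop: fuel 4 suffices because each pass through the loop body that makes
-- progress adds a fresh syllable (out of 4) to 'used', and without progress the loop stops
def greedyLoop : Nat → List Char → List String → List Char
  | 0, rest, _ => rest
  | n+1, rest, used =>
    if rest = [] then rest
    else
      match stripFirst ["aya", "ye", "woo", "ma"] rest used with
      | some (s, rest') => greedyLoop n rest' (s :: used)
      | none => rest

def solution_alt (babbling : List String) : Int :=
  babbling.foldl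
    (fun count bb =>
      if bb.toList ≠ [] ∧ greedyLoop 4 bb.toList [] = [] then count + 1 else count) 0

-- ===== PRECONDITION & SPEC =====
def Spec_solution (babbling : List String) (out : Int) : Prop := out = solution_alt babbling
instance (babbling : List String) (out : Int) : Decidable (Spec_solution babbling out) := by unfold Spec_solution; infer_instance

-- ===== CLAIM (what is proved, stated in full; the proofs are below) =====
def Claim_equal_solution : Prop := ∀ (babbling : List String), Dom_solution babbling → Spec_solution babbling (solution babbling)

-- ===== LEMMAS AND PROOFS =====

-- all char-lists the greedy loop can fully consume (with fuel n and used-set u)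
def concats : Nat → List String → List (List Char)
  | 0, _ => [[]]
  | n+1, used =>
    [] :: (["aya", "ye", "woo", "ma"].filter (fun s => !used.contains s)).flatMap
      (fun s => (concats n (s :: used)).map (fun l => s.toList ++ l))

theorem stripFirst_spec (ss : List String) (rest : List Char) (used : List String)
    (s : String) (r' : List Char) (h : stripFirst ss rest used = some (s, r')) :
    s ∈ ss ∧ used.contains s = false ∧ rest = s.toList ++ r' := by
  induction ss with
  | nil => simp [stripFirst] at h
  | cons a as ih =>
    by_cases hc : used.contains a = false ∧ a.toList.isPrefixOf rest
    · simp only [stripFirst, if_pos hc] at h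
      obtain ⟨h1, h2⟩ := Prod.mk.injEq .. ▸ Option.some.injEq .. ▸ h
      subst h1
      refine ⟨List.mem_cons_self, hc.1, ?_⟩
      subst h2
      have hp := hc.2
      rw [List.isPrefixOf_iff_prefix] at hp
      exact (List.prefix_iff_eq_append.mp hp).symm
    · simp only [stripFirst, if_neg hc] at h
      obtain ⟨m, hu, he⟩ := ih h
      exact ⟨List.mem_cons_of_mem _ m, hu, he⟩

theorem greedy_mem_concats (n : Nat) (rest : List Char) (used : List String)
    (h : greedyLoop n rest used = []) : rest ∈ concats n used := by
  induction n generalizing rest used with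
  | zero => simp [greedyLoop] at h; simp [h, concats]
  | succ n ih =>
    by_cases hr : rest = []
    · subst hr; exact List.mem_cons_self
    · simp only [greedyLoop, if_neg hr] at h
      rcases hs : stripFirst ["aya", "ye", "woo", "ma"] rest used with _ | ⟨s, rest'⟩
      · rw [hs] at h; exact absurd h hr
      · rw [hs] at h
        obtain ⟨hmem, hu, he⟩ := stripFirst_spec _ _ _ _ _ hs
        have hr' := ih _ _ h
        apply List.mem_cons_of_mem
        apply List.mem_flatMap.mpr
        refine ⟨s, ?_, ?_⟩
        · simp only [List.mem_filter]
          exact ⟨hmem, by simpa using hu⟩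
        · exact List.mem_map.mpr ⟨rest', hr', he.symm⟩

-- every nonempty consumable char-list is the character list of some table word (finite check)
theorem concats_in_words :
    ∀ l ∈ concats 4 [], l ≠ [] → (pyWords.any (fun w => w.toList = l)) = true := by decide

-- every table word is nonempty and fully consumed by the greedy loop (finite check)
theorem words_greedy :
    ∀ w ∈ pyWords, w.toList ≠ [] ∧ greedyLoop 4 w.toList [] = [] := by decide

theorem key (bb : String) :
    (bb ∈ pyWords) ↔ (bb.toList ≠ [] ∧ greedyLoop 4 bb.toList [] = []) := by
  constructor
  · intro h; exact words_greedy bb h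
  · rintro ⟨hne, hg⟩
    have hmem := greedy_mem_concats 4 bb.toList [] hg
    have := concats_in_words bb.toList hmem hne
    obtain ⟨w, hw, he⟩ := List.any_eq_true.mp this
    have : w = bb := String.toList_inj.mp (by simpa using he)
    exact this ▸ hw

theorem fold_eq (babbling : List String) (acc : Int) :
    babbling.foldl (fun answer bb => if bb ∈ pyWords then answer + 1 else answer) acc =
    babbling.foldl
      (fun count bb =>
        if bb.toList ≠ [] ∧ greedyLoop 4 bb.toList [] = [] then count + 1 else count) acc := by
  induction babbling generalizing acc with
  | nil => rfl
  | cons bb bs ih =>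
    simp only [List.foldl_cons]
    rw [if_congr (key bb) rfl rfl]
    exact ih _

-- ===== VERDICT (by name: the statement is the Claim_ definition above) =====
theorem solution_spec : Claim_equal_solution := by
  intro babbling _
  unfold Spec_solution solution solution_alt
  exact fold_eq babbling 0
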